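-- pv_equiv track=rewrite | github.com/dream201188/algorithm017 | src/tmp_submit/数字翻译成大写汉字.py | process_integer
-- ===== SOURCE A (Python) =====
-- def process_integer(num_integer):
--     pre = []
--     length = len(num_integer)
--     if length <= 4:
--         pre.append(num_integer)
--     else:
--         extra = length % 4
--         if extra != 0:
--             pre.append(num_integer[0: extra])
--             length = length - extra
--             start, end = extra, 4 + extra
--         else:
--             start, end = 0, 4
--         while length:
--             pre.append(num_integer[start: end])
--             start += 4
--             end += 4
--             length -= 4
--     return pre
-- ===== SOURCE B (Python) =====
-- def process_integer(num_integer):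
--     if len(num_integer) <= 4:
--         return [num_integer]
--     chunks = []
--     s = num_integer
--     while len(s) > 4:
--         chunks.append(s[-4:])
--         s = s[:-4]
--     chunks.append(s)
--     chunks.reverse()
--     return chunks
-- ===== Notes on version B (the rewrite author's own statement) =====
-- stated objective: alternative
-- what changed: B builds the 4-char groups right-to-left by repeatedly splitting off the last 4 characters and reversing at the end, instead of A's left-to-right index arithmetic with length % 4 for the leading short group.
import Mathlib
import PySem

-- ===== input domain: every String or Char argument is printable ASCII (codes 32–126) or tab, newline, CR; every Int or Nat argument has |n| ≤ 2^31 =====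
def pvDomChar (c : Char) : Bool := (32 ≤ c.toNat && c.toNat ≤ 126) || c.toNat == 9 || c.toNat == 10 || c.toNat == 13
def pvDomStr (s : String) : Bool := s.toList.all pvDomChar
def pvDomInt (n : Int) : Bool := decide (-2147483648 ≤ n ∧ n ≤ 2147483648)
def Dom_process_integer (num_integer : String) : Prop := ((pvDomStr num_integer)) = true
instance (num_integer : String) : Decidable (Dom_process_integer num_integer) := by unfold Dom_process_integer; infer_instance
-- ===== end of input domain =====

-- B builds the 4-char groups right-to-left (split off the last 4 chars, reverse at the end)
-- instead of A's left-to-right index arithmetic with length % 4; same cost, alternative decomposition.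

-- ===== PORT A =====
-- the while loop: while length: pre.append(s[start:end]); start += 4; end += 4; length -= 4
-- (length is a nonnegative multiple of 4 whenever the loop is reached)
def pvLoopA (s : String) (start fin : Int) (length : Nat) (pre : List String) : List String :=
  if length = 0 then pre
  else pvLoopA s (start + 4) (fin + 4) (length - 4)
         (pre ++ [PySem.Str.slice s (some start) (some fin)])
  termination_by length
  decreasing_by omega

def process_integer (num_integer : String) : List String :=
  let pre : List String := []
  let length := num_integer.toList.length
  if length ≤ 4 then
    pre ++ [num_integer]
  else
    let extra := length % 4
    if extra ≠ 0 then
      pvLoopA num_integer (extra : Int) ((4 : Int) + (extra : Int)) (length - extra)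
        (pre ++ [PySem.Str.slice num_integer (some 0) (some (extra : Int))])
    else
      pvLoopA num_integer 0 4 length pre

-- ===== PORT B =====
-- the while loop: while len(s) > 4: chunks.append(s[-4:]); s = s[:-4]  — then chunks.append(s)
def pvLoopB (s : String) (chunks : List String) : List String :=
  if 4 < s.toList.length then
    pvLoopB (PySem.Str.slice s none (some (-4)))
      (chunks ++ [PySem.Str.slice s (some (-4)) none])
  else chunks ++ [s]
  termination_by s.toList.length
  decreasing_by
    rename_i h
    rw [PySem.Str.toList_slice, PySem.Chars.slice_eq_listSlice,
      PySem.List.slice_to_neg_ofNat _ 4 (by omega)]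
    simp only [List.length_take]
    omega

def process_integer_alt (num_integer : String) : List String :=
  if num_integer.toList.length ≤ 4 then
    [num_integer]
  else
    (pvLoopB num_integer []).reverse

-- ===== PRECONDITION & SPEC =====
def Spec_process_integer (num_integer : String) (out : List String) : Prop := out = process_integer_alt num_integer
instance (num_integer : String) (out : List String) : Decidable (Spec_process_integer num_integer out) := by unfold Spec_process_integer; infer_instance

-- ===== CLAIM (what is proved, stated in full; the proofs are below) =====
def Claim_equal_process_integer : Prop := ∀ (num_integer : String), Dom_process_integer num_integer → Spec_process_integer num_integer (process_integer num_integer)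

-- ===== LEMMAS AND PROOFS =====
-- reference chunkings of the character list: pvChunksA is A's left-to-right grouping,
-- pvChunksR is B's right-to-left grouping (in discovery order, i.e. reversed)
def pvGroups (l : List Char) (start k : Nat) : List (List Char) :=
  match k with
  | 0 => []
  | k + 1 => ((l.drop start).take 4) :: pvGroups l (start + 4) k

def pvChunksA (l : List Char) : List (List Char) :=
  if l.length ≤ 4 then [l]
  else if l.length % 4 ≠ 0 then
    l.take (l.length % 4) :: pvGroups l (l.length % 4) ((l.length - l.length % 4) / 4)
  else pvGroups l 0 (l.length / 4)

def pvChunksR (l : List Char) : List (List Char) :=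
  if 4 < l.length then
    (l.drop (l.length - 4)) :: pvChunksR (l.take (l.length - 4))
  else [l]
  termination_by l.length
  decreasing_by simp only [List.length_take]; omega

theorem pvGroups_append (l : List Char) (k : Nat) : ∀ start,
    pvGroups l start (k + 1) = pvGroups l start k ++ [(l.drop (start + 4 * k)).take 4] := by
  induction k with
  | zero => intro start; simp [pvGroups]
  | succ k ih =>
    intro start
    rw [pvGroups, ih (start + 4), pvGroups]
    simp
    congr 2
    omega

theorem pvGroups_take (l : List Char) (m : Nat) (k : Nat) : ∀ start, start + 4 * k ≤ m →
    pvGroups (l.take m) start k = pvGroups l start k := by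
  induction k with
  | zero => intro _ _; rfl
  | succ k ih =>
    intro start h
    rw [pvGroups, pvGroups, ih (start + 4) (by omega)]
    congr 1
    rw [List.drop_take, List.take_take]
    congr 1
    omega

theorem pvChunksA_peel (l : List Char) (h : 4 < l.length) :
    pvChunksA l = pvChunksA (l.take (l.length - 4)) ++ [l.drop (l.length - 4)] := by
  have hlt : (l.take (l.length - 4)).length = l.length - 4 := by
    simp only [List.length_take]; omega
  have hdrop : (l.drop (l.length - 4)).take 4 = l.drop (l.length - 4) := by
    apply List.take_of_length_le; simp only [List.length_drop]; omega
  rw [pvChunksA, if_neg (by omega), pvChunksA, hlt]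
  by_cases hsmall : l.length - 4 <= 4
  · rw [if_pos hsmall]
    by_cases hr : l.length % 4 = 0
    · have hn8 : l.length = 8 := by omega
      rw [if_neg (by omega)]
      have h2 : l.length / 4 = 2 := by omega
      have hd4 : (l.drop 4).take 4 = l.drop 4 :=
        List.take_of_length_le (by simp only [List.length_drop]; omega)
      rw [h2]
      simp [pvGroups, hn8, hd4]
    · rw [if_pos (by omega)]
      have hrm : l.length % 4 = l.length - 4 := by omega
      have h1 : (l.length - l.length % 4) / 4 = 1 := by omega
      rw [h1, hrm]
      simp [pvGroups, hdrop]
  · rw [if_neg hsmall]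
    have hmod : (l.length - 4) % 4 = l.length % 4 := by omega
    rw [hmod]
    by_cases hr : l.length % 4 = 0
    · rw [if_neg (by omega), if_neg (by omega)]
      have hdvd : 4 * ((l.length - 4) / 4) = l.length - 4 := by omega
      have hk : l.length / 4 = (l.length - 4) / 4 + 1 := by omega
      rw [hk, pvGroups_append, pvGroups_take l (l.length - 4) _ 0 (by omega)]
      simp [hdvd, hdrop]
    · rw [if_pos (by omega), if_pos (by omega)]
      have hrm : l.length % 4 ≤ l.length - 4 := by omega
      have hdvd : l.length % 4 + 4 * ((l.length - 4 - l.length % 4) / 4) = l.length - 4 := by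
        omega
      have hk : (l.length - l.length % 4) / 4 = (l.length - 4 - l.length % 4) / 4 + 1 := by
        omega
      rw [hk, pvGroups_append, pvGroups_take l (l.length - 4) _ (l.length % 4) (by omega)]
      rw [List.take_take, Nat.min_eq_left hrm]
      simp [hdvd, hdrop]

theorem pvChunksA_eq (l : List Char) : pvChunksA l = (pvChunksR l).reverse := by
  rw [pvChunksR]
  by_cases h : 4 < l.length
  · rw [if_pos h]
    have ih := pvChunksA_eq (l.take (l.length - 4))
    rw [List.reverse_cons, ← ih, pvChunksA_peel l h]
  · rw [if_neg h, pvChunksA, if_pos (by omega)]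
    rfl
  termination_by l.length
  decreasing_by simp only [List.length_take]; omega

theorem pvLoopA_eq (s : String) (k : Nat) : ∀ (start : Nat) (acc : List String),
    pvLoopA s (start : Int) ((start : Int) + 4) (4 * k) acc
      = acc ++ (pvGroups s.toList start k).map String.ofList := by
  induction k with
  | zero => intro start acc; rw [pvLoopA]; simp [pvGroups]
  | succ k ih =>
    intro start acc
    rw [pvLoopA, if_neg (by omega)]
    have h4 : 4 * (k + 1) - 4 = 4 * k := by omega
    have hst : (start : Int) + 4 = ((start + 4 : Nat) : Int) := by push_cast; ring
    rw [h4, hst]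
    rw [ih (start + 4)]
    have hsl : PySem.Str.slice s (some (start : Int)) (some ((start + 4 : Nat) : Int))
        = String.ofList ((s.toList.drop start).take 4) := by
      show String.ofList _ = _
      rw [PySem.Chars.slice_eq_listSlice, PySem.List.slice_natCast]
      congr 2
      omega
    rw [hsl, pvGroups]
    simp

theorem processA_eq (s : String) : process_integer s = (pvChunksA s.toList).map String.ofList := by
  simp only [process_integer, pvChunksA, List.nil_append]
  by_cases h : s.toList.length ≤ 4
  · rw [if_pos h, if_pos h]
    simp
  · rw [if_neg h, if_neg h]
    set n := s.toList.length with hn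
    by_cases hr : n % 4 = 0
    · rw [if_neg (by simpa using hr), if_neg (by simpa using hr)]
      have hk : n = 4 * (n / 4) := by omega
      have h0 : (0 : Int) = ((0 : Nat) : Int) := by norm_num
      have h4 : (4 : Int) = (((0 : Nat) : Int)) + 4 := by norm_num
      rw [h0, h4]
      conv_lhs => rw [hk]
      rw [pvLoopA_eq s (n / 4) 0 []]
      simp
    · rw [if_pos (by simpa using hr), if_pos (by simpa using hr)]
      set r := n % 4 with hrdef
      have hk : n - r = 4 * ((n - r) / 4) := by omega
      have h4 : (4 : Int) + (r : Int) = ((r : Nat) : Int) + 4 := by push_cast; ring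
      rw [h4]
      conv_lhs => rw [hk]
      rw [pvLoopA_eq s ((n - r) / 4) r]
      have hsl : PySem.Str.slice s (some 0) (some (r : Int))
          = String.ofList (s.toList.take r) := by
        show String.ofList _ = _
        rw [PySem.Chars.slice_eq_listSlice]
        simp [PySem.List.slice_to_natCast]
      rw [hsl]
      simp

theorem pvLoopB_eq (s : String) (acc : List String) :
    pvLoopB s acc = acc ++ (pvChunksR s.toList).map String.ofList := by
  rw [pvLoopB, pvChunksR]
  by_cases h : 4 < s.toList.length
  · rw [if_pos h, if_pos h]
    have htail : (PySem.Str.slice s none (some (-4))).toList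
        = s.toList.take (s.toList.length - 4) := by
      rw [PySem.Str.toList_slice, PySem.Chars.slice_eq_listSlice,
        PySem.List.slice_to_neg_ofNat _ 4 (by omega)]
    have hlast : PySem.Str.slice s (some (-4)) none
        = String.ofList (s.toList.drop (s.toList.length - 4)) := by
      show String.ofList _ = _
      rw [PySem.Chars.slice_eq_listSlice, PySem.List.slice_from_neg_ofNat _ 4 (by omega)]
    have ih := pvLoopB_eq (PySem.Str.slice s none (some (-4)))
      (acc ++ [PySem.Str.slice s (some (-4)) none])
    rw [ih, htail, hlast]
    simp
  · rw [if_neg h, if_neg h]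
    simp
  termination_by s.toList.length
  decreasing_by
    rw [PySem.Str.toList_slice, PySem.Chars.slice_eq_listSlice,
      PySem.List.slice_to_neg_ofNat _ 4 (by omega)]
    simp only [List.length_take]
    omega

theorem processB_eq (s : String) :
    process_integer_alt s = ((pvChunksR s.toList).reverse).map String.ofList := by
  rw [process_integer_alt]
  by_cases h : s.toList.length ≤ 4
  · rw [if_pos h, pvChunksR, if_neg (by omega)]
    simp
  · rw [if_neg h, pvLoopB_eq s []]
    simp

-- ===== VERDICT (by name: the statement is the Claim_ definition above) =====
theorem process_integer_spec : Claim_equal_process_integer := by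
  intro s _
  show process_integer s = process_integer_alt s
  rw [processA_eq, processB_eq, pvChunksA_eq]
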